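-- pv_equiv track=rewrite | github.com/rkvermaa/rag-playbook | src/chunking.py | add_contextual_headers
-- ===== SOURCE A (Python) =====
-- def add_contextual_headers(chunks: list, document_text: str) -> list:
--     """Prepend hierarchical context to chunks based on markdown headers."""
--     import re
--
--     lines = document_text.split('\n')
--     headers_map = {}
--     current_h1, current_h2, current_h3 = None, None, None
--     char_count = 0
--
--     for line in lines:
--         if line.startswith('# '):
--             current_h1 = line[2:].strip()
--             current_h2, current_h3 = None, None
--         elif line.startswith('## '):
--             current_h2 = line[3:].strip()
--             current_h3 = None
--         elif line.startswith('### '):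
--             current_h3 = line[4:].strip()
--
--         headers_map[char_count] = (current_h1, current_h2, current_h3)
--         char_count += len(line) + 1
--
--     enriched_chunks = []
--     for chunk in chunks:
--         chunk_pos = document_text.find(chunk[:50])
--         if chunk_pos == -1:
--             enriched_chunks.append(chunk)
--             continue
--
--         h1, h2, h3 = None, None, None
--         for pos in sorted(headers_map.keys(), reverse=True):
--             if pos <= chunk_pos:
--                 h1, h2, h3 = headers_map[pos]
--                 break
--
--         header_parts = []
--         if h1:
--             header_parts.append(h1)
--         if h2:
--             header_parts.append(h2)
--         if h3:
--             header_parts.append(h3)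
--
--         if header_parts:
--             header = " > ".join(header_parts)
--             enriched_chunk = f"[{header}]\n\n{chunk}"
--         else:
--             enriched_chunk = chunk
--
--         enriched_chunks.append(enriched_chunk)
--
--     return enriched_chunks
-- ===== SOURCE B (Python) =====
-- def add_contextual_headers(chunks: list, document_text: str) -> list:
--     """Prepend hierarchical context to chunks based on markdown headers.
--
--     One pass over the lines precomputes, for each line start, the fully rendered
--     header prefix; each chunk then binary-searches the sorted start positions.
--     """
--     h1 = h2 = h3 = None
--     pos = 0
--     starts = []
--     headers = []
--     for line in document_text.split('\n'):
--         if line.startswith('# '):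
--             h1, h2, h3 = line[2:].strip(), None, None
--         elif line.startswith('## '):
--             h2, h3 = line[3:].strip(), None
--         elif line.startswith('### '):
--             h3 = line[4:].strip()
--         parts = [h for h in (h1, h2, h3) if h]
--         starts.append(pos)
--         headers.append("[" + " > ".join(parts) + "]\n\n" if parts else "")
--         pos += len(line) + 1
--
--     out = []
--     for chunk in chunks:
--         cp = document_text.find(chunk[:50])
--         if cp == -1:
--             out.append(chunk)
--             continue
--         lo, hi = 0, len(starts) - 1
--         while lo < hi:
--             mid = (lo + hi + 1) // 2
--             if starts[mid] <= cp:
--                 lo = mid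
--             else:
--                 hi = mid - 1
--         out.append(headers[lo] + chunk)
--     return out
-- ===== Notes on version B (the rewrite author's own statement) =====
-- stated objective: alternative
-- what changed: B precomputes one rendered header prefix per line in a single pass and binary-searches the (already increasing) line-start positions per chunk, instead of A's per-chunk reverse-sorting of all dict keys followed by a linear scan for the last header position.
import Mathlib
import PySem

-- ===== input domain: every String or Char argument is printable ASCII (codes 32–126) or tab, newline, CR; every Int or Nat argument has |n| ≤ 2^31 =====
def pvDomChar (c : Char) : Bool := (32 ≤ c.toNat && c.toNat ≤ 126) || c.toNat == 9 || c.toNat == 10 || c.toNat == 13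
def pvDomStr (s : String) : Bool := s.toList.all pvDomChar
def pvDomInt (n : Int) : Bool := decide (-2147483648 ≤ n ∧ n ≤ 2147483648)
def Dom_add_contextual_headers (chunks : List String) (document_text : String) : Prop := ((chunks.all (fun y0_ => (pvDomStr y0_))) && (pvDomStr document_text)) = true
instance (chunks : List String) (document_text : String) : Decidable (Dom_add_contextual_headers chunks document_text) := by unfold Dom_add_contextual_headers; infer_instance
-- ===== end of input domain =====

-- B replaces A's per-chunk sort of all header positions by a precomputed list of rendered
-- header prefixes plus a binary search over the (already increasing) line-start positions.

abbrev PvTriple := Option String × Option String × Option String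

-- the if/elif header update, line for line identical in A and B
def pvStep (hs : PvTriple) (line : String) : PvTriple :=
  if PySem.Str.startswith line "# " then
    (some (PySem.Str.strip (PySem.Str.slice line (some 2) none)), none, none)
  else if PySem.Str.startswith line "## " then
    (hs.1, some (PySem.Str.strip (PySem.Str.slice line (some 3) none)), none)
  else if PySem.Str.startswith line "### " then
    (hs.1, hs.2.1, some (PySem.Str.strip (PySem.Str.slice line (some 4) none)))
  else (hs.1, hs.2.1, hs.2.2)

-- ===== PORT A =====

-- body of A's line loop: headers_map[char_count] = (h1,h2,h3); char_count += len(line)+1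
def pvLoopA (st : PvTriple × Int × PySem.Dict Int PvTriple) (line : String) :
    PvTriple × Int × PySem.Dict Int PvTriple :=
  let hs := pvStep st.1 line
  (hs, st.2.1 + PySem.Str.len line + 1, st.2.2.insert st.2.1 hs)

-- body of A's chunk loop
def pvChunkA (document_text : String) (headers_map : PySem.Dict Int PvTriple) (chunk : String) :
    String :=
  let chunk_pos := PySem.Str.find document_text (PySem.Str.slice chunk none (some 50))
  if chunk_pos = -1 then chunk
  else
    -- for pos in sorted(headers_map.keys(), reverse=True): if pos <= chunk_pos: …; break
    let hs : PvTriple :=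
      match (PySem.List.sorted headers_map.keys (fun x => x) true).find?
          (fun pos => decide (pos ≤ chunk_pos)) with
      | some pos => headers_map.getD pos (none, none, none)  -- headers_map[pos]: pos is a key, lookup never fails
      | none => (none, none, none)
    let header_parts :=
      ((([] : List String)
        ++ (match hs.1 with | some s => if s = "" then [] else [s] | none => []))
        ++ (match hs.2.1 with | some s => if s = "" then [] else [s] | none => []))
        ++ (match hs.2.2 with | some s => if s = "" then [] else [s] | none => [])
    if header_parts ≠ [] then
      PySem.Str.join "" ["[", PySem.Str.join " > " header_parts, "]\n\n", chunk]
    else chunk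

def add_contextual_headers (chunks : List String) (document_text : String) : List String :=
  let lines := (PySem.Str.split? document_text "\n").getD []  -- sep "\n" ≠ "": split? never none
  let st := lines.foldl pvLoopA ((none, none, none), 0, PySem.Dict.empty)
  chunks.foldl (fun acc chunk => acc ++ [pvChunkA document_text st.2.2 chunk]) []

-- ===== PORT B =====

-- [h for h in (h1, h2, h3) if h]
def pvParts (hs : PvTriple) : List String :=
  ([hs.1, hs.2.1, hs.2.2] : List (Option String)).filterMap
    (fun o => match o with | some s => if s = "" then none else some s | none => none)

-- "[" + " > ".join(parts) + "]\n\n" if parts else ""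
def pvRender (hs : PvTriple) : String :=
  if pvParts hs ≠ [] then
    PySem.Str.join "" ["[", PySem.Str.join " > " (pvParts hs), "]\n\n"]
  else ""

-- body of B's line loop: starts.append(pos); headers.append(rendered prefix); pos += len(line)+1
def pvLoopB (st : PvTriple × Int × List Int × List String) (line : String) :
    PvTriple × Int × List Int × List String :=
  let hs := pvStep st.1 line
  (hs, st.2.1 + PySem.Str.len line + 1, st.2.2.1 ++ [st.2.1], st.2.2.2 ++ [pvRender hs])

-- B's while-loop binary search; lo, hi are list indices (both stay in range, so Nat is exact)
def pvBsearch (starts : List Int) (cp : Int) (lo hi : Nat) : Nat :=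
  if h : lo < hi then
    if starts.getD ((lo + hi + 1) / 2) 0 ≤ cp then pvBsearch starts cp ((lo + hi + 1) / 2) hi
    else pvBsearch starts cp lo ((lo + hi + 1) / 2 - 1)
  else lo
termination_by hi - lo
decreasing_by all_goals omega

-- body of B's chunk loop; headers[lo] read with getD: lo < len(headers) always (lines ≠ [])
def pvChunkB (document_text : String) (starts : List Int) (headers : List String)
    (chunk : String) : String :=
  let cp := PySem.Str.find document_text (PySem.Str.slice chunk none (some 50))
  if cp = -1 then chunk
  else PySem.Str.join "" [headers.getD (pvBsearch starts cp 0 (starts.length - 1)) "", chunk]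

def add_contextual_headers_alt (chunks : List String) (document_text : String) : List String :=
  let lines := (PySem.Str.split? document_text "\n").getD []  -- sep "\n" ≠ "": split? never none
  let st := lines.foldl pvLoopB ((none, none, none), 0, [], [])
  chunks.foldl (fun acc chunk => acc ++ [pvChunkB document_text st.2.2.1 st.2.2.2 chunk]) []

-- ===== PRECONDITION & SPEC =====
def Spec_add_contextual_headers (chunks : List String) (document_text : String) (out : List String) : Prop := out = add_contextual_headers_alt chunks document_text
instance (chunks : List String) (document_text : String) (out : List String) : Decidable (Spec_add_contextual_headers chunks document_text out) := by unfold Spec_add_contextual_headers; infer_instance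

-- ===== CLAIM (what is proved, stated in full; the proofs are below) =====
def Claim_equal_add_contextual_headers : Prop := ∀ (chunks : List String) (document_text : String), Dom_add_contextual_headers chunks document_text → Spec_add_contextual_headers chunks document_text (add_contextual_headers chunks document_text)

-- ===== LEMMAS AND PROOFS =====

-- spec sequence of (line start, header triple) rows, shared target of both builds
def pvRows : List String → PvTriple → Int → List (Int × PvTriple)
  | [], _, _ => []
  | line :: rest, t, cc =>
      (cc, pvStep t line) :: pvRows rest (pvStep t line) (cc + PySem.Str.len line + 1)

lemma pvRows_ge : ∀ (lines : List String) (t : PvTriple) (cc : Int),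
    ∀ p ∈ pvRows lines t cc, cc ≤ p.1 := by
  intro lines
  induction lines with
  | nil => intro t cc p hp; simp [pvRows] at hp
  | cons line rest ih =>
    intro t cc p hp
    have hlen : (0 : Int) ≤ PySem.Str.len line := by rw [PySem.Str.len_eq]; positivity
    rw [pvRows] at hp
    rcases List.mem_cons.mp hp with rfl | hp
    · simp
    · have := ih (pvStep t line) (cc + PySem.Str.len line + 1) p hp
      omega

lemma pvRows_pairwise : ∀ (lines : List String) (t : PvTriple) (cc : Int),
    ((pvRows lines t cc).map (·.1)).Pairwise (· < ·) := by
  intro lines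
  induction lines with
  | nil => intro t cc; simp [pvRows]
  | cons line rest ih =>
    intro t cc
    have hlen : (0 : Int) ≤ PySem.Str.len line := by rw [PySem.Str.len_eq]; positivity
    simp only [pvRows, List.map_cons, List.pairwise_cons]
    refine ⟨?_, ih _ _⟩
    intro y hy
    simp only [List.mem_map] at hy
    obtain ⟨p, hp, rfl⟩ := hy
    have := pvRows_ge rest (pvStep t line) (cc + PySem.Str.len line + 1) p hp
    omega

lemma buildA : ∀ (lines : List String) (t : PvTriple) (cc : Int) (d : PySem.Dict Int PvTriple),
    (∀ k ∈ d.keys, k < cc) →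
    (lines.foldl pvLoopA (t, cc, d)).2.2.items = d.items ++ pvRows lines t cc ∧
    (lines.foldl pvLoopA (t, cc, d)).2.2.keys = d.keys ++ (pvRows lines t cc).map (·.1) := by
  intro lines
  induction lines with
  | nil => intro t cc d _; simp [pvRows]
  | cons line rest ih =>
    intro t cc d hlt
    have hlen : (0 : Int) ≤ PySem.Str.len line := by rw [PySem.Str.len_eq]; positivity
    have hnc : d.contains cc = false := by
      rcases h : d.contains cc with _ | _
      · rfl
      · exact absurd (hlt cc ((PySem.Dict.contains_iff_mem_keys d cc).mp h)) (lt_irrefl cc)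
    have hlt' : ∀ k ∈ (d.insert cc (pvStep t line)).keys, k < cc + PySem.Str.len line + 1 := by
      intro k hk
      rw [PySem.Dict.keys_insert_of_not_contains d _ hnc] at hk
      rcases List.mem_append.mp hk with hk | hk
      · have := hlt k hk; omega
      · simp at hk; omega
    have hmain := ih (pvStep t line) (cc + PySem.Str.len line + 1)
      (d.insert cc (pvStep t line)) hlt'
    simp only [List.foldl_cons, pvLoopA] at hmain ⊢
    rw [hmain.1, hmain.2, PySem.Dict.items_insert_of_not_contains d _ hnc,
      PySem.Dict.keys_insert_of_not_contains d _ hnc]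
    simp [pvRows]

lemma buildB : ∀ (lines : List String) (t : PvTriple) (cc : Int) (starts : List Int)
    (headers : List String),
    (lines.foldl pvLoopB (t, cc, starts, headers)).2.2.1
      = starts ++ (pvRows lines t cc).map (·.1) ∧
    (lines.foldl pvLoopB (t, cc, starts, headers)).2.2.2
      = headers ++ (pvRows lines t cc).map (fun p => pvRender p.2) := by
  intro lines
  induction lines with
  | nil => intro t cc starts headers; simp [pvRows]
  | cons line rest ih =>
    intro t cc starts headers
    have hmain := ih (pvStep t line) (cc + PySem.Str.len line + 1)
      (starts ++ [cc]) (headers ++ [pvRender (pvStep t line)])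
    simp only [List.foldl_cons, pvLoopB] at hmain ⊢
    rw [hmain.1, hmain.2]
    simp [pvRows]

lemma splitOn_go_ne_nil (sep : List Char) (fuel : Nat) (l cur : List Char)
    (acc : List (List Char)) : PySem.Chars.splitOn.go sep fuel l cur acc ≠ [] := by
  induction fuel generalizing l cur acc with
  | zero => simp [PySem.Chars.splitOn.go]
  | succ n ih =>
    cases l with
    | nil => simp [PySem.Chars.splitOn.go]
    | cons c rest =>
      rw [PySem.Chars.splitOn.go]
      split <;> [exact ih _ _ _; exact ih _ _ _]

lemma lines_ne_nil (s : String) : (PySem.Str.split? s "\n").getD [] ≠ [] := by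
  have hb := PySem.Str.split?_map s "\n"
  have htl : "\n".toList = ['\n'] := rfl
  rcases h : PySem.Str.split? s "\n" with _ | L
  · rw [h] at hb
    simp [PySem.Chars.split?, htl] at hb
  · rw [h] at hb
    simp only [Option.getD_some]
    intro hL
    subst hL
    simp only [Option.map_some, List.map_nil] at hb
    rw [show PySem.Chars.split? s.toList "\n".toList
        = some (PySem.Chars.splitOn s.toList "\n".toList) from by
      simp [PySem.Chars.split?, htl]] at hb
    rw [PySem.Chars.splitOn] at hb
    exact splitOn_go_ne_nil _ _ _ _ _ ((Option.some_inj.mp hb).symm)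

lemma pvBsearch_spec (starts : List Int) (cp : Int)
    (hmono : ∀ i j : Nat, i < j → j < starts.length → starts.getD i 0 < starts.getD j 0) :
    ∀ (lo hi : Nat), lo ≤ hi → hi < starts.length → starts.getD lo 0 ≤ cp →
    lo ≤ pvBsearch starts cp lo hi ∧ pvBsearch starts cp lo hi ≤ hi ∧
    starts.getD (pvBsearch starts cp lo hi) 0 ≤ cp ∧
    (∀ j : Nat, pvBsearch starts cp lo hi < j → j ≤ hi → cp < starts.getD j 0) := by
  intro lo hi
  induction lo, hi using pvBsearch.induct starts cp with
  | case1 lo hi h hc ih =>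
    intro _ hlen _
    rw [pvBsearch, dif_pos h, if_pos hc]
    obtain ⟨h1, h2, h3, h4⟩ := ih (by omega) hlen hc
    exact ⟨by omega, h2, h3, h4⟩
  | case2 lo hi h hc ih =>
    intro hle hlen hlo
    rw [pvBsearch, dif_pos h, if_neg hc]
    obtain ⟨h1, h2, h3, h4⟩ := ih (by omega) (by omega) hlo
    refine ⟨h1, by omega, h3, ?_⟩
    intro j hj hjhi
    by_cases hcase : j ≤ (lo + hi + 1) / 2 - 1
    · exact h4 j hj hcase
    · have hm : cp < starts.getD ((lo + hi + 1) / 2) 0 := not_le.mp hc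
      rcases Nat.lt_or_ge ((lo + hi + 1) / 2) j with hlt | hge
      · exact lt_trans hm (hmono _ j hlt (by omega))
      · have : j = (lo + hi + 1) / 2 := by omega
        rw [this]; exact hm
  | case3 lo hi h =>
    intro hle hlen hlo
    rw [pvBsearch, dif_neg h]
    exact ⟨le_refl _, hle, hlo, fun j hj hjhi => by omega⟩

lemma find?_reverse_eq (p : Int → Bool) : ∀ (l : List Int) (i : Nat), i < l.length →
    p (l.getD i 0) = true → (∀ j, i < j → j < l.length → p (l.getD j 0) = false) →
    l.reverse.find? p = some (l.getD i 0) := by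
  intro l
  induction l using List.reverseRecOn with
  | nil => intro i hi; simp at hi
  | append_singleton xs x ih =>
    intro i hi hpi hafter
    rw [List.reverse_append, List.reverse_singleton, List.singleton_append]
    by_cases hix : i = xs.length
    · have hgd : (xs ++ [x]).getD i 0 = x := by
        rw [hix, List.getD_append_right xs [x] 0 _ (le_refl _)]
        simp
      rw [hgd] at hpi ⊢
      exact List.find?_cons_of_pos hpi
    · have hilt : i < xs.length := by simp at hi; omega
      have hx : p x = false := by
        have := hafter xs.length (by omega) (by simp)
        rwa [List.getD_append_right xs [x] 0 _ (le_refl _), Nat.sub_self] at this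
      rw [List.find?_cons_of_neg (by simp [hx])]
      rw [List.getD_append _ _ _ _ hilt] at hpi ⊢
      exact ih i hilt hpi (fun j hj hjl => by
        have := hafter j hj (by simp; omega)
        rwa [List.getD_append _ _ _ _ hjl] at this)

lemma partsA_eq (hs : PvTriple) :
    ((([] : List String)
      ++ (match hs.1 with | some s => if s = "" then [] else [s] | none => []))
      ++ (match hs.2.1 with | some s => if s = "" then [] else [s] | none => []))
      ++ (match hs.2.2 with | some s => if s = "" then [] else [s] | none => [])
    = pvParts hs := by
  rcases hs with ⟨h1, h2, h3⟩
  cases h1 <;> cases h2 <;> cases h3 <;>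
    simp only [pvParts, List.filterMap_cons, List.filterMap_nil] <;>
    (try split_ifs) <;> simp_all

lemma join_empty_pair (y : String) : PySem.Str.join "" ["", y] = y := by
  rw [← String.toList_inj]
  simp [PySem.Str.toList_join, PySem.Chars.join, List.intercalate, List.intersperse]

lemma join_nest (a b c y : String) :
    PySem.Str.join "" [PySem.Str.join "" [a, b, c], y] = PySem.Str.join "" [a, b, c, y] := by
  rw [← String.toList_inj]
  simp [PySem.Str.toList_join, PySem.Chars.join, List.intercalate, List.intersperse]

lemma chunk_eq (document_text : String) (rows : List (Int × PvTriple))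
    (d : PySem.Dict Int PvTriple)
    (hitems : d.items = rows) (hkeys : d.keys = rows.map (·.1))
    (hne : rows ≠ []) (hfst : (rows.map (·.1)).getD 0 0 = 0)
    (hpw : (rows.map (·.1)).Pairwise (· < ·)) (chunk : String) :
    pvChunkA document_text d chunk
      = pvChunkB document_text (rows.map (·.1)) (rows.map (fun p => pvRender p.2)) chunk := by
  simp only [pvChunkA, pvChunkB]
  set cp := PySem.Str.find document_text (PySem.Str.slice chunk none (some 50)) with hcp
  by_cases hneg : cp = -1
  · rw [if_pos hneg, if_pos hneg]
  · rw [if_neg hneg, if_neg hneg]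
    have hcp0 : 0 ≤ cp := by
      have h1 : -1 ≤ cp := by
        rw [hcp, PySem.Str.find_eq]
        exact PySem.Chars.neg_one_le_find _ _
      omega
    have hlen : 0 < rows.length := List.length_pos_iff.mpr hne
    have hkllen : (rows.map (·.1)).length = rows.length := by simp
    have hmono : ∀ i j : Nat, i < j → j < (rows.map (·.1)).length →
        (rows.map (·.1)).getD i 0 < (rows.map (·.1)).getD j 0 := by
      intro i j hij hj
      rw [List.getD_eq_getElem _ _ (by omega), List.getD_eq_getElem _ _ hj]
      exact List.pairwise_iff_getElem.mp hpw i j (by omega) hj hij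
    obtain ⟨hr0, hrhi, hrle, hrafter⟩ := pvBsearch_spec (rows.map (·.1)) cp hmono 0
      ((rows.map (·.1)).length - 1) (by omega) (by omega) (by rw [hfst]; exact hcp0)
    set r := pvBsearch (rows.map (·.1)) cp 0 ((rows.map (·.1)).length - 1) with hr
    have hrlen : r < rows.length := by omega
    have hsorted : PySem.List.sorted d.keys (fun x => x) true = (rows.map (·.1)).reverse := by
      rw [hkeys]
      exact PySem.List.sorted_rev_eq_of_perm_of_pairwise_gt _ _ _ (List.reverse_perm _)
        (List.pairwise_reverse.mpr hpw)
    have hfind : (rows.map (·.1)).reverse.find? (fun pos => decide (pos ≤ cp))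
        = some ((rows.map (·.1)).getD r 0) := by
      apply find?_reverse_eq _ _ r (by omega)
        (by simp only [decide_eq_true_eq]; exact hrle)
      intro j hj hjl
      simp only [decide_eq_false_iff_not, not_le]
      exact hrafter j hj (by omega)
    have hkeyval : (rows.map (·.1)).getD r 0 = (rows.getD r (0, (none, none, none))).1 := by
      rw [List.getD_eq_getElem _ _ (by omega), List.getD_eq_getElem _ _ hrlen, List.getElem_map]
    have hnodup : d.keys.Nodup := by
      rw [hkeys]; exact hpw.imp (fun h => ne_of_lt h)
    have hget : d.get? ((rows.map (·.1)).getD r 0)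
        = some ((rows.getD r (0, (none, none, none))).2) := by
      apply PySem.Dict.get?_of_mem_items _ _ hnodup
      rw [hitems, hkeyval]
      have hmem : rows.getD r (0, (none, none, none)) ∈ rows := by
        rw [List.getD_eq_getElem _ _ hrlen]; exact List.getElem_mem _
      simpa using hmem
    have hgetd : d.getD ((rows.map (·.1)).getD r 0) (none, none, none)
        = (rows.getD r (0, (none, none, none))).2 :=
      PySem.Dict.getD_of_get?_eq_some d _ hget
    have hhead : (rows.map (fun p => pvRender p.2)).getD r ""
        = pvRender ((rows.getD r (0, (none, none, none))).2) := by
      rw [List.getD_eq_getElem _ _ (by rw [List.length_map]; omega),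
        List.getD_eq_getElem _ _ hrlen, List.getElem_map]
    rw [hsorted, hfind]
    simp only [hgetd, hhead, partsA_eq]
    by_cases hp : pvParts ((rows.getD r ((0 : Int),
        ((none : Option String), (none : Option String), (none : Option String)))).2) = []
    · rw [if_neg (not_not_intro hp), pvRender, if_neg (not_not_intro hp), join_empty_pair]
    · rw [if_pos hp, pvRender, if_pos hp, join_nest]

-- ===== VERDICT (by name: the statement is the Claim_ definition above) =====
theorem add_contextual_headers_spec : Claim_equal_add_contextual_headers := by
  intro chunks document_text _
  unfold Spec_add_contextual_headers add_contextual_headers add_contextual_headers_alt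
  simp only [PySem.List.foldl_append_singleton_eq_map, List.nil_append]
  apply List.map_congr_left
  intro chunk _
  have hlne := lines_ne_nil document_text
  set lines := (PySem.Str.split? document_text "\n").getD [] with hlines
  obtain ⟨hA1, hA2⟩ := buildA lines (none, none, none) 0 PySem.Dict.empty (by
    intro k hk
    simp [PySem.Dict.keys_empty] at hk)
  obtain ⟨hB1, hB2⟩ := buildB lines (none, none, none) 0 [] []
  set rows := pvRows lines (none, none, none) 0 with hrows
  have hne : rows ≠ [] := by
    cases hl : lines with
    | nil => exact absurd hl hlne
    | cons l0 rest => rw [hrows, hl, pvRows]; simp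
  have hfst : (rows.map (·.1)).getD 0 0 = 0 := by
    cases hl : lines with
    | nil => exact absurd hl hlne
    | cons l0 rest => rw [hrows, hl, pvRows]; simp
  rw [show (lines.foldl pvLoopB ((none, none, none), 0, [], [])).2.2.1
      = rows.map (·.1) from by rw [hB1]; simp,
    show (lines.foldl pvLoopB ((none, none, none), 0, [], [])).2.2.2
      = rows.map (fun p => pvRender p.2) from by rw [hB2]; simp]
  exact chunk_eq document_text rows _
    (by rw [hA1]; simp [show (PySem.Dict.empty : PySem.Dict Int PvTriple).items = [] from rfl])
    (by rw [hA2]; simp [show (PySem.Dict.empty : PySem.Dict Int PvTriple).keys = [] from rfl])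
    hne hfst (pvRows_pairwise _ _ _) chunk
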